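-- pv_equiv track=rewrite | github.com/xormania/mboxer | src/mboxer/classify.py | _select_excerpts
-- ===== SOURCE A (Python) =====
-- def _select_excerpts(bodies: list[str], max_chars: int = 500) -> list[str]:
--     """Pick up to 4 representative body excerpts: first, middle(s), last."""
--     non_empty = [(i, b.strip()) for i, b in enumerate(bodies) if b and b.strip()]
--     if not non_empty:
--         return []
--     if len(non_empty) == 1:
--         return [non_empty[0][1][:max_chars]]
--
--     selected_idxs: list[int] = [non_empty[0][0], non_empty[-1][0]]
--     if len(non_empty) > 2:
--         mid = non_empty[len(non_empty) // 2][0]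
--         if mid not in selected_idxs:
--             selected_idxs.insert(1, mid)
--     if len(non_empty) > 4:
--         q3 = non_empty[(3 * len(non_empty)) // 4][0]
--         if q3 not in selected_idxs:
--             selected_idxs.insert(-1, q3)
--
--     seen: set[int] = set()
--     result: list[str] = []
--     for idx, body in sorted(non_empty, key=lambda x: x[0]):
--         if idx in selected_idxs and idx not in seen:
--             seen.add(idx)
--             result.append(body[:max_chars])
--     return result
-- ===== SOURCE B (Python) =====
-- def _select_excerpts(bodies: list[str], max_chars: int = 500) -> list[str]:
--     """Pick up to 4 representative body excerpts: first, middle(s), last.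
--
--     Works with positions inside the stripped non-empty list instead of original
--     indices, so the tuples, the re-sort and the seen-set of A disappear."""
--     texts = [b.strip() for b in bodies if b and b.strip()]
--     n = len(texts)
--     if n == 0:
--         return []
--     if n == 1:
--         return [texts[0][:max_chars]]
--     positions = [0]
--     if n > 2:
--         positions.append(n // 2)
--     if n > 4:
--         positions.append((3 * n) // 4)
--     positions.append(n - 1)
--     return [texts[p][:max_chars] for p in positions]
-- ===== Notes on version B (the rewrite author's own statement) =====
-- stated objective: simpler
-- what changed: B keeps only the stripped texts and selects by position within that list (0, n//2, 3n//4, n-1 are provably distinct and increasing), eliminating A's original-index tuples, the membership-guarded inserts, the re-sort and the seen-set dedup pass.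
import Mathlib
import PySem

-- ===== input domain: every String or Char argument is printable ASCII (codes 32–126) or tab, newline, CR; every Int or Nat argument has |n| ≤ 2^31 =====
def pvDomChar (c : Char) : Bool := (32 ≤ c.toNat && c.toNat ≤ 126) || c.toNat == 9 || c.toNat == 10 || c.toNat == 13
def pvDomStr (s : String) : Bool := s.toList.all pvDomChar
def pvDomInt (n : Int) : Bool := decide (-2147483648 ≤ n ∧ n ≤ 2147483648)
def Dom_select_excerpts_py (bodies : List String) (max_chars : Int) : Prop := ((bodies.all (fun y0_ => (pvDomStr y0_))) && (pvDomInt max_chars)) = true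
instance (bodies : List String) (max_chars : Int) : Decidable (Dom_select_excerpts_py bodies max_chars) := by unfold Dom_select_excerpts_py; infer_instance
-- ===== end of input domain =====

-- B selects by position inside the stripped non-empty list (0, n//2, 3n//4, n-1), dropping A's
-- original-index tuples, guarded inserts, re-sort and seen-set: simpler, same return value.

-- ===== PORT A =====
def select_excerpts_py (bodies : List String) (max_chars : Int) : List String :=
  -- non_empty = [(i, b.strip()) for i, b in enumerate(bodies) if b and b.strip()]
  let non_empty : List (Int × String) :=
    ((PySem.List.enumerate bodies 0).filter
        (fun p => !(p.2 == "") && !(PySem.Str.strip p.2 == ""))).map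
      (fun p => (p.1, PySem.Str.strip p.2))
  if non_empty = [] then []
  else if non_empty.length = 1 then
    [PySem.Str.slice (PySem.List.pyGetD non_empty 0 (0, "")).2 none (some max_chars)]
  else
    -- selected_idxs = [non_empty[0][0], non_empty[-1][0]]
    let selected₀ : List Int :=
      [(PySem.List.pyGetD non_empty 0 (0, "")).1,
       (PySem.List.pyGetD non_empty (-1) (0, "")).1]
    let selected₁ : List Int :=
      if 2 < non_empty.length then
        let mid := (PySem.List.pyGetD non_empty
          (PySem.Int.floordiv (non_empty.length : Int) 2) (0, "")).1
        if mid ∈ selected₀ then selected₀ else PySem.List.insert selected₀ 1 mid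
      else selected₀
    let selected : List Int :=
      if 4 < non_empty.length then
        let q3 := (PySem.List.pyGetD non_empty
          (PySem.Int.floordiv (3 * (non_empty.length : Int)) 4) (0, "")).1
        if q3 ∈ selected₁ then selected₁ else PySem.List.insert selected₁ (-1) q3
      else selected₁
    -- for idx, body in sorted(non_empty, key=…): if idx in selected_idxs and idx not in seen: …
    ((PySem.List.sorted non_empty (fun x => x.1) false).foldl
        (fun (st : PySem.Set Int × List String) p =>
          if p.1 ∈ selected ∧ p.1 ∉ st.1 then
            (st.1.add p.1, st.2 ++ [PySem.Str.slice p.2 none (some max_chars)])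
          else st)
        (PySem.Set.empty, [])).2

-- ===== PORT B =====
def select_excerpts_py_alt (bodies : List String) (max_chars : Int) : List String :=
  -- texts = [b.strip() for b in bodies if b and b.strip()]
  let texts : List String :=
    (bodies.filter (fun b => !(b == "") && !(PySem.Str.strip b == ""))).map
      (fun b => PySem.Str.strip b)
  let n : Int := texts.length
  if n = 0 then []
  else if n = 1 then [PySem.Str.slice (PySem.List.pyGetD texts 0 "") none (some max_chars)]
  else
    let positions₀ : List Int := [0]
    let positions₁ : List Int :=
      if 2 < n then positions₀ ++ [PySem.Int.floordiv n 2] else positions₀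
    let positions₂ : List Int :=
      if 4 < n then positions₁ ++ [PySem.Int.floordiv (3 * n) 4] else positions₁
    let positions : List Int := positions₂ ++ [n - 1]
    positions.map (fun p => PySem.Str.slice (PySem.List.pyGetD texts p "") none (some max_chars))

-- ===== PRECONDITION & SPEC =====
def Spec_select_excerpts_py (bodies : List String) (max_chars : Int) (out : List String) : Prop := out = select_excerpts_py_alt bodies max_chars
instance (bodies : List String) (max_chars : Int) (out : List String) : Decidable (Spec_select_excerpts_py bodies max_chars out) := by unfold Spec_select_excerpts_py; infer_instance

-- ===== CLAIM (what is proved, stated in full; the proofs are below) =====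
def Claim_equal_select_excerpts_py : Prop := ∀ (bodies : List String) (max_chars : Int), Dom_select_excerpts_py bodies max_chars → Spec_select_excerpts_py bodies max_chars (select_excerpts_py bodies max_chars)

-- ===== LEMMAS AND PROOFS =====

def pvD : Int × String := (0, "")

-- A's selected_idxs list, stage by stage (definitionally the lets of the port)
def pvSel0 (ne : List (Int × String)) : List Int :=
  [(PySem.List.pyGetD ne 0 pvD).1, (PySem.List.pyGetD ne (-1) pvD).1]

def pvSel1 (ne : List (Int × String)) : List Int :=
  if 2 < ne.length then
    if (PySem.List.pyGetD ne (PySem.Int.floordiv (ne.length : Int) 2) pvD).1 ∈ pvSel0 ne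
    then pvSel0 ne
    else PySem.List.insert (pvSel0 ne) 1
      (PySem.List.pyGetD ne (PySem.Int.floordiv (ne.length : Int) 2) pvD).1
  else pvSel0 ne

def pvSel (ne : List (Int × String)) : List Int :=
  if 4 < ne.length then
    if (PySem.List.pyGetD ne (PySem.Int.floordiv (3 * (ne.length : Int)) 4) pvD).1 ∈ pvSel1 ne
    then pvSel1 ne
    else PySem.List.insert (pvSel1 ne) (-1)
      (PySem.List.pyGetD ne (PySem.Int.floordiv (3 * (ne.length : Int)) 4) pvD).1
  else pvSel1 ne

-- A's algorithm from its non_empty list onward (definitionally A's body tail)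
def pvAcore (ne : List (Int × String)) (m : Int) : List String :=
  if ne = [] then []
  else if ne.length = 1 then
    [PySem.Str.slice (PySem.List.pyGetD ne 0 pvD).2 none (some m)]
  else
    ((PySem.List.sorted ne (fun x => x.1) false).foldl
        (fun (st : PySem.Set Int × List String) p =>
          if p.1 ∈ pvSel ne ∧ p.1 ∉ st.1 then
            (st.1.add p.1, st.2 ++ [PySem.Str.slice p.2 none (some m)])
          else st)
        (PySem.Set.empty, [])).2

-- B's position list (definitionally the lets of the port)
def pvPos (n : Int) : List Int :=
  (if 4 < n then
     (if 2 < n then [0] ++ [PySem.Int.floordiv n 2] else [0]) ++ [PySem.Int.floordiv (3 * n) 4]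
   else (if 2 < n then [0] ++ [PySem.Int.floordiv n 2] else [0])) ++ [n - 1]

-- B's algorithm from its texts list onward (definitionally B's body tail)
def pvBcore (ts : List String) (m : Int) : List String :=
  if (ts.length : Int) = 0 then []
  else if (ts.length : Int) = 1 then
    [PySem.Str.slice (PySem.List.pyGetD ts 0 "") none (some m)]
  else (pvPos (ts.length : Int)).map
    (fun p => PySem.Str.slice (PySem.List.pyGetD ts p "") none (some m))

lemma pvA_eq_core (bodies : List String) (m : Int) :
    select_excerpts_py bodies m =
      pvAcore (((PySem.List.enumerate bodies 0).filter
          (fun p => !(p.2 == "") && !(PySem.Str.strip p.2 == ""))).map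
        (fun p => (p.1, PySem.Str.strip p.2))) m := rfl

lemma pvB_eq_core (bodies : List String) (m : Int) :
    select_excerpts_py_alt bodies m =
      pvBcore ((bodies.filter (fun b => !(b == "") && !(PySem.Str.strip b == ""))).map
        (fun b => PySem.Str.strip b)) m := rfl

-- the stripped texts are exactly the second components of A's non_empty pairs
lemma pvMapSnd (bodies : List String) : ∀ (s : Int),
    (((PySem.List.enumerate bodies s).filter
        (fun p => !(p.2 == "") && !(PySem.Str.strip p.2 == ""))).map
      (fun p => (p.1, PySem.Str.strip p.2))).map (fun p => p.2)
    = (bodies.filter (fun b => !(b == "") && !(PySem.Str.strip b == ""))).map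
        (fun b => PySem.Str.strip b) := by
  induction bodies with
  | nil => intro s; simp [PySem.List.enumerate_nil]
  | cons b t ih =>
    intro s
    rw [PySem.List.enumerate_cons]
    by_cases h : (!(b == "") && !(PySem.Str.strip b == "")) = true
    · simp [h, ih]
    · simp only [Bool.not_eq_true] at h
      simp [h, ih]

-- the first components of A's non_empty pairs are strictly increasing
lemma pvPairwiseFst (bodies : List String) (s : Int) :
    (((PySem.List.enumerate bodies s).filter
        (fun p => !(p.2 == "") && !(PySem.Str.strip p.2 == ""))).map
      (fun p => (p.1, PySem.Str.strip p.2))).Pairwise (fun p q => p.1 < q.1) := by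
  refine List.Pairwise.map _ ?_ ((PySem.List.pairwise_lt_enumerate bodies s).filter _)
  intro a b h; exact h

lemma pvInsert1 (a b m : Int) : PySem.List.insert [a, b] 1 m = [a, m, b] := by
  simp [PySem.List.insert, PySem.List.sliceIndices]

lemma pvInsertNeg1 (a b c q : Int) : PySem.List.insert [a, b, c] (-1) q = [a, b, q, c] := by
  simp [PySem.List.insert, PySem.List.sliceIndices]

-- strict monotonicity of the first components under the Pairwise hypothesis
lemma pvMono (ne : List (Int × String)) (hpw : ne.Pairwise (fun p q => p.1 < q.1))
    (j k : Nat) (hjk : j < k) (hk : k < ne.length) :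
    (ne.getD j pvD).1 < (ne.getD k pvD).1 := by
  rw [List.getD_eq_getElem ne pvD (lt_trans hjk hk), List.getD_eq_getElem ne pvD hk]
  exact List.pairwise_iff_getElem.mp hpw j k (lt_trans hjk hk) hk hjk

-- filtering a list = filtering its index range and reading back
lemma pvFilterIdx {α : Type} (d : α) (pred : α → Bool) :
    ∀ (l : List α), l.filter pred
      = ((List.range l.length).filter (fun k => pred (l.getD k d))).map (fun k => l.getD k d) := by
  intro l
  induction l with
  | nil => simp
  | cons x t ih =>
    rw [List.length_cons, List.range_succ_eq_map]
    cases hp : pred x <;>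
      simp [hp, List.filter_map, Function.comp_def, ih, List.map_map]

-- filtering range n by membership in a strictly increasing bounded list returns that list
lemma pvRangeFilterMem (n : Nat) (P : List Nat) (hpw : P.Pairwise (· < ·))
    (hb : ∀ p ∈ P, p < n) :
    (List.range n).filter (fun k => decide (k ∈ P)) = P := by
  have h1 : ((List.range n).filter (fun k => decide (k ∈ P))).Pairwise (· < ·) :=
    (List.pairwise_lt_range).filter _
  have nd1 : ((List.range n).filter (fun k => decide (k ∈ P))).Nodup :=
    h1.imp (fun h => Nat.ne_of_lt h)
  have nd2 : P.Nodup := hpw.imp (fun h => Nat.ne_of_lt h)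
  have hperm : ((List.range n).filter (fun k => decide (k ∈ P))).Perm P := by
    refine List.perm_of_nodup_nodup_toFinset_eq nd1 nd2 ?_
    ext k
    simp only [List.mem_toFinset, List.mem_filter, List.mem_range, decide_eq_true_eq]
    exact ⟨fun h => h.2, fun h => ⟨hb k h, h⟩⟩
  exact List.Perm.eq_of_pairwise
    (fun a b _ _ hab hba => absurd hab (Nat.lt_asymm hba)) h1 hpw hperm

-- the seen-set fold of A appends exactly the selected, not-yet-seen bodies in order
lemma pvLoop (sel : List Int) (m : Int) :
    ∀ (l : List (Int × String)) (seen : PySem.Set Int) (acc : List String),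
      (∀ p ∈ l, p.1 ∉ seen) → (l.map (fun p => p.1)).Nodup →
      (l.foldl
          (fun (st : PySem.Set Int × List String) p =>
            if p.1 ∈ sel ∧ p.1 ∉ st.1 then
              (st.1.add p.1, st.2 ++ [PySem.Str.slice p.2 none (some m)])
            else st)
          (seen, acc)).2
      = acc ++ (l.filter (fun p => decide (p.1 ∈ sel))).map
          (fun p => PySem.Str.slice p.2 none (some m)) := by
  intro l
  induction l with
  | nil => intro seen acc _ _; simp
  | cons p t ih =>
    intro seen acc hseen hnd
    simp only [List.map_cons, List.nodup_cons, List.mem_map] at hnd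
    have hpt : ∀ q ∈ t, q.1 ∉ PySem.Set.add seen p.1 := by
      intro q hq hmem
      rcases (PySem.Set.mem_add seen p.1 q.1).1 hmem with h | h
      · exact hseen q (List.mem_cons_of_mem _ hq) h
      · exact hnd.1 ⟨q, hq, h⟩
    by_cases hsel : p.1 ∈ sel
    · rw [List.foldl_cons, if_pos ⟨hsel, hseen p (List.mem_cons_self)⟩,
        ih _ _ hpt hnd.2]
      simp [hsel]
    · rw [List.foldl_cons, if_neg (by tauto), ih _ _ ?_ hnd.2]
      · simp [hsel]
      · intro q hq; exact hseen q (List.mem_cons_of_mem _ hq)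

-- A's whole tail, for any strictly increasing and bounded position list P
lemma pvTail (ne : List (Int × String)) (m : Int)
    (hpw : ne.Pairwise (fun p q => p.1 < q.1))
    (P : List Nat) (hPpw : P.Pairwise (· < ·)) (hPb : ∀ p ∈ P, p < ne.length) :
    ((PySem.List.sorted ne (fun x => x.1) false).foldl
        (fun (st : PySem.Set Int × List String) p =>
          if p.1 ∈ P.map (fun k => (ne.getD k pvD).1) ∧ p.1 ∉ st.1 then
            (st.1.add p.1, st.2 ++ [PySem.Str.slice p.2 none (some m)])
          else st)
        (PySem.Set.empty, [])).2
      = P.map (fun k => PySem.Str.slice (ne.getD k pvD).2 none (some m)) := by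
  have hinj : ∀ j k, j < ne.length → k < ne.length →
      (ne.getD j pvD).1 = (ne.getD k pvD).1 → j = k := by
    intro j k hj hk heq
    rcases Nat.lt_trichotomy j k with h | h | h
    · exact absurd heq (ne_of_lt (pvMono ne hpw j k h hk))
    · exact h
    · exact absurd heq.symm (ne_of_lt (pvMono ne hpw k j h hj))
  rw [PySem.List.sorted_eq_self_of_pairwise ne (fun x => x.1)
    (hpw.imp (fun h => le_of_lt h))]
  rw [pvLoop (P.map (fun k => (ne.getD k pvD).1)) m ne PySem.Set.empty []
      (by intro p _ hmem; simp [PySem.Set.empty] at hmem)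
      (List.pairwise_map.mpr (hpw.imp (fun h => ne_of_lt h)))]
  rw [List.nil_append]
  have hfil : ne.filter (fun p => decide (p.1 ∈ P.map (fun k => (ne.getD k pvD).1)))
      = P.map (fun k => ne.getD k pvD) := by
    rw [pvFilterIdx pvD (fun p => decide (p.1 ∈ P.map (fun k => (ne.getD k pvD).1))) ne]
    rw [List.filter_congr (q := fun k => decide (k ∈ P)) ?_]
    · rw [pvRangeFilterMem ne.length P hPpw hPb]
    · intro k hk
      rw [List.mem_range] at hk
      simp only [decide_eq_decide, List.mem_map]
      constructor
      · rintro ⟨j, hj, heq⟩; exact hinj j k (hPb j hj) hk heq ▸ hj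
      · intro hkP; exact ⟨k, hkP, rfl⟩
  rw [hfil, List.map_map]
  rfl

-- main core equality
lemma pvCoreEq (ne : List (Int × String)) (m : Int)
    (hpw : ne.Pairwise (fun p q => p.1 < q.1)) :
    pvAcore ne m = pvBcore (ne.map (fun p => p.2)) m := by
  by_cases h0 : ne = []
  · subst h0; simp [pvAcore, pvBcore]
  have hlpos : 0 < ne.length := List.length_pos_iff.mpr h0
  by_cases h1 : ne.length = 1
  · obtain ⟨p, hp⟩ := List.length_eq_one_iff.mp h1
    subst hp
    simp [pvAcore, pvBcore, PySem.List.pyGetD_zero_cons, pvD]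
  -- from here ne.length ≥ 2
  have hn2 : 2 ≤ ne.length := by omega
  -- endpoint evaluations
  have e0 : PySem.List.pyGetD ne 0 pvD = ne.getD 0 pvD := PySem.List.pyGetD_zero ne pvD
  have eN : PySem.List.pyGetD ne (-1) pvD = ne.getD (ne.length - 1) pvD := by
    rw [PySem.List.pyGetD_neg_one ne pvD h0, List.getLast_eq_getElem,
      List.getD_eq_getElem ne pvD (by omega)]
  have eMid : PySem.List.pyGetD ne (PySem.Int.floordiv (ne.length : Int) 2) pvD
      = ne.getD (ne.length / 2) pvD := by
    have h2 : PySem.Int.floordiv (ne.length : Int) 2 = ((ne.length / 2 : Nat) : Int) := by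
      exact_mod_cast PySem.Int.floordiv_natCast ne.length 2
    rw [h2, PySem.List.pyGetD_natCast]
  have eQ3 : PySem.List.pyGetD ne (PySem.Int.floordiv (3 * (ne.length : Int)) 4) pvD
      = ne.getD (3 * ne.length / 4) pvD := by
    have h3 : (3 * (ne.length : Int)) = ((3 * ne.length : Nat) : Int) := by push_cast; ring
    have h4 : PySem.Int.floordiv ((3 * ne.length : Nat) : Int) 4
        = ((3 * ne.length / 4 : Nat) : Int) := by
      exact_mod_cast PySem.Int.floordiv_natCast (3 * ne.length) 4
    rw [h3, h4, PySem.List.pyGetD_natCast]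
  have hts : ∀ k, k < ne.length → (List.map (fun p => p.2) ne).getD k "" = (ne.getD k pvD).2 := by
    intro k hk
    rw [List.getD_eq_getElem _ _ (by simpa using hk), List.getD_eq_getElem ne pvD hk,
      List.getElem_map]
  -- branch conditions of the cores
  have hA0 : ¬ (ne = []) := h0
  have hA1 : ¬ (ne.length = 1) := h1
  have hB0 : ¬ (((ne.map (fun p => p.2)).length : Int) = 0) := by
    simp only [List.length_map]; omega
  have hB1 : ¬ (((ne.map (fun p => p.2)).length : Int) = 1) := by
    simp only [List.length_map]; omega
  unfold pvAcore pvBcore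
  rw [if_neg hA0, if_neg hA1, if_neg hB0, if_neg hB1]
  simp only [List.length_map]
  by_cases h4 : 4 < ne.length
  · -- n > 4 : positions 0, n/2, 3n/4, n-1
    have h2 : 2 < ne.length := by omega
    have hsel : pvSel ne
        = [0, ne.length / 2, 3 * ne.length / 4, ne.length - 1].map
            (fun k => (ne.getD k pvD).1) := by
      have hsel1 : pvSel1 ne
          = [(ne.getD 0 pvD).1, (ne.getD (ne.length / 2) pvD).1,
             (ne.getD (ne.length - 1) pvD).1] := by
        unfold pvSel1 pvSel0
        rw [if_pos h2, eMid, e0, eN, if_neg ?_, pvInsert1]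
        simp only [List.mem_cons, List.not_mem_nil, or_false]
        push_neg
        exact ⟨ne_of_gt (pvMono ne hpw 0 (ne.length / 2) (by omega) (by omega)),
               ne_of_lt (pvMono ne hpw (ne.length / 2) (ne.length - 1) (by omega) (by omega))⟩
      unfold pvSel
      rw [if_pos h4, hsel1, eQ3, if_neg ?_, pvInsertNeg1]
      · simp
      · simp only [List.mem_cons, List.not_mem_nil, or_false]
        push_neg
        exact ⟨ne_of_gt (pvMono ne hpw 0 (3 * ne.length / 4) (by omega) (by omega)),
               ne_of_gt (pvMono ne hpw (ne.length / 2) (3 * ne.length / 4) (by omega) (by omega)),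
               ne_of_lt (pvMono ne hpw (3 * ne.length / 4) (ne.length - 1) (by omega) (by omega))⟩
    simp only [hsel]
    rw [pvTail ne m hpw [0, ne.length / 2, 3 * ne.length / 4, ne.length - 1]
        (by simp [List.pairwise_cons]; omega)
        (by intro p hp; simp at hp; rcases hp with h | h | h | h <;> omega)]
    -- B side
    have hB2 : (2 : Int) < (ne.length : Int) := by omega
    have hB4 : (4 : Int) < (ne.length : Int) := by omega
    have c1 : PySem.Int.floordiv (ne.length : Int) 2 = ((ne.length / 2 : Nat) : Int) := by
      exact_mod_cast PySem.Int.floordiv_natCast ne.length 2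
    have c2 : PySem.Int.floordiv (3 * (ne.length : Int)) 4 = ((3 * ne.length / 4 : Nat) : Int) := by
      have h3 : (3 * (ne.length : Int)) = ((3 * ne.length : Nat) : Int) := by push_cast; ring
      rw [h3]; exact_mod_cast PySem.Int.floordiv_natCast (3 * ne.length) 4
    have c3 : ((ne.length : Int) - 1) = ((ne.length - 1 : Nat) : Int) := by omega
    unfold pvPos
    rw [if_pos hB4, if_pos hB2, c1, c2, c3]
    simp only [List.cons_append, List.nil_append, List.map_cons, List.map_nil,
      PySem.List.pyGetD_natCast, PySem.List.pyGetD_zero]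
    rw [hts 0 (by omega), hts (ne.length / 2) (by omega),
      hts (3 * ne.length / 4) (by omega), hts (ne.length - 1) (by omega)]
  · by_cases h2 : 2 < ne.length
    · -- 2 < n ≤ 4 : positions 0, n/2, n-1
      have hsel : pvSel ne
          = [0, ne.length / 2, ne.length - 1].map (fun k => (ne.getD k pvD).1) := by
        have hsel1 : pvSel1 ne
            = [(ne.getD 0 pvD).1, (ne.getD (ne.length / 2) pvD).1,
               (ne.getD (ne.length - 1) pvD).1] := by
          unfold pvSel1 pvSel0
          rw [if_pos h2, eMid, e0, eN, if_neg ?_, pvInsert1]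
          simp only [List.mem_cons, List.not_mem_nil, or_false]
          push_neg
          exact ⟨ne_of_gt (pvMono ne hpw 0 (ne.length / 2) (by omega) (by omega)),
                 ne_of_lt (pvMono ne hpw (ne.length / 2) (ne.length - 1) (by omega) (by omega))⟩
        unfold pvSel
        rw [if_neg h4, hsel1]
        simp
      simp only [hsel]
      rw [pvTail ne m hpw [0, ne.length / 2, ne.length - 1]
          (by simp [List.pairwise_cons]; omega)
          (by intro p hp; simp at hp; rcases hp with h | h | h <;> omega)]
      have hB2 : (2 : Int) < (ne.length : Int) := by omega
      have hB4 : ¬ ((4 : Int) < (ne.length : Int)) := by omega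
      have c1 : PySem.Int.floordiv (ne.length : Int) 2 = ((ne.length / 2 : Nat) : Int) := by
        exact_mod_cast PySem.Int.floordiv_natCast ne.length 2
      have c3 : ((ne.length : Int) - 1) = ((ne.length - 1 : Nat) : Int) := by omega
      unfold pvPos
      rw [if_neg hB4, if_pos hB2, c1, c3]
      simp only [List.cons_append, List.nil_append, List.map_cons, List.map_nil,
        PySem.List.pyGetD_natCast, PySem.List.pyGetD_zero]
      rw [hts 0 (by omega), hts (ne.length / 2) (by omega), hts (ne.length - 1) (by omega)]
    · -- n = 2 : positions 0, n-1
      have hn : ne.length = 2 := by omega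
      have hsel : pvSel ne = [0, ne.length - 1].map (fun k => (ne.getD k pvD).1) := by
        unfold pvSel pvSel1 pvSel0
        rw [if_neg h4, if_neg h2, e0, eN]
        simp
      simp only [hsel]
      rw [pvTail ne m hpw [0, ne.length - 1]
          (by simp [List.pairwise_cons]; omega)
          (by intro p hp; simp at hp; rcases hp with h | h <;> omega)]
      have hB2 : ¬ ((2 : Int) < (ne.length : Int)) := by omega
      have hB4 : ¬ ((4 : Int) < (ne.length : Int)) := by omega
      have c3 : ((ne.length : Int) - 1) = ((ne.length - 1 : Nat) : Int) := by omega
      unfold pvPos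
      rw [if_neg hB4, if_neg hB2, c3]
      simp only [List.cons_append, List.nil_append, List.map_cons, List.map_nil,
        PySem.List.pyGetD_natCast, PySem.List.pyGetD_zero]
      rw [hts 0 (by omega), hts (ne.length - 1) (by omega)]

-- ===== VERDICT (by name: the statement is the Claim_ definition above) =====
theorem select_excerpts_py_spec : Claim_equal_select_excerpts_py := by
  intro bodies max_chars _
  unfold Spec_select_excerpts_py
  rw [pvA_eq_core, pvB_eq_core, ← pvMapSnd bodies 0]
  exact pvCoreEq _ _ (pvPairwiseFst bodies 0)
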